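-- pv_equiv track=rewrite | github.com/hbhargava7/celltx | celltx/biolayer/biolayer.py | gen_states_for_tx_cell
-- ===== SOURCE A (Python) =====
-- def gen_states_for_tx_cell(tx_cell):
--     state_names = tx_cell['states']
--     # vars is an array of string names
--     # desired output is:
--     # [[(activated, 0), (primed, 0)], [(activated, 1), (primed, 1)], ...]
--     # for each state, iterate through the other states
--     n = len(state_names)
--     out = []
--     # Iterate through all possible states of n binary vars
--     for i in range(1 << n):
--         s = bin(i)[2:]
--         s = '0' * (n - len(s)) + s
--         state = list(map(int, list(s)))
--         state_description = [(state_names[j], state[j]) for j in range(n)]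
--         out.append(state_description)
--     return out
-- ===== SOURCE B (Python) =====
-- def gen_states_for_tx_cell(tx_cell):
--     result = [[]]
--     for name in tx_cell['states']:
--         result = [c + [(name, v)] for c in result for v in (0, 1)]
--     return result
-- ===== Notes on version B (the rewrite author's own statement) =====
-- stated objective: faster
-- what changed: Replaces per-integer binary-string decoding (bin/pad/map-int/index) over range(2**n) by iterative doubling: start from [[]] and for each state name extend every partial combination with (name,0) then (name,1), which yields the same binary-counting order without any string formatting or indexing.
-- outside the precondition, e.g. on gen_states_for_tx_cell({}): A raises KeyError, B raises KeyError
import Mathlib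
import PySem

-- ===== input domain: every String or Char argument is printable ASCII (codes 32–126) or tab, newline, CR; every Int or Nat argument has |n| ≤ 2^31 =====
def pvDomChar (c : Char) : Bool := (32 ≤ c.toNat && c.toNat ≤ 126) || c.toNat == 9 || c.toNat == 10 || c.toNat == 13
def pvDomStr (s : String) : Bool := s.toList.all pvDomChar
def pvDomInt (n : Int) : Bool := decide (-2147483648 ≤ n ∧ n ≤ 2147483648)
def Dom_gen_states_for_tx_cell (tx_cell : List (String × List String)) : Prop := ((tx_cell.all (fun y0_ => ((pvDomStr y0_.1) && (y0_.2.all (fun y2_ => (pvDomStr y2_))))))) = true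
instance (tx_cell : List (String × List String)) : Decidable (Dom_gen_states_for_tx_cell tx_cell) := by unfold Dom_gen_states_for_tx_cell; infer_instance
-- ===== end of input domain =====

-- B replaces A's binary-string decoding of each i in range(2^n) by iterative doubling
-- (extend every partial combination with (name,0) then (name,1)); measured constant-factor faster.

-- ===== PORT A =====
-- bin(i)[2:] for a natural number i: the binary digits of i, '0' for i = 0 (exact for i ≥ 0)
def pvBin : Nat → List Char
  | 0 => ['0']
  | 1 => ['1']
  | (n+2) => pvBin ((n+2)/2) ++ [if (n+2) % 2 = 1 then '1' else '0']
decreasing_by exact Nat.div_lt_self (by omega) (by omega)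

-- A's loop over range(1 << n), on the already-looked-up list of state names
def pvLoopA (state_names : List String) : List (List (String × Int)) :=
  let n := state_names.length
  (PySem.List.pyRange 0 (1 <<< (n : Nat) : Int) 1).foldl (fun out i =>
    let s := pvBin i.toNat                                -- bin(i)[2:]; i ≥ 0 inside range(1 << n)
    let s := List.replicate (n - s.length) '0' ++ s       -- '0' * (n - len(s)) + s
    let state : List Int := s.map (fun c => (c.toNat : Int) - 48)   -- list(map(int, list(s))); exact on digit chars
    let state_description := (List.range n).map (fun j => (state_names.getD j "", state.getD j 0))
      -- state_names[j], state[j]: j < n ≤ lengths, so getD is exact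
    out ++ [state_description]) []

def gen_states_for_tx_cell (tx_cell : List (String × List String)) : List (List (String × Int)) :=
  pvLoopA (((PySem.Dict.ofList tx_cell).get? "states").getD [])   -- tx_cell['states']; KeyError excluded by Pre_

-- ===== PORT B =====
-- B's doubling loop, on the already-looked-up list of state names
def pvLoopB (state_names : List String) : List (List (String × Int)) :=
  state_names.foldl
    (fun result name => result.flatMap (fun c => [c ++ [(name, (0 : Int))], c ++ [(name, (1 : Int))]]))
    [[]]

def gen_states_for_tx_cell_alt (tx_cell : List (String × List String)) : List (List (String × Int)) :=
  pvLoopB (((PySem.Dict.ofList tx_cell).get? "states").getD [])   -- tx_cell['states']; KeyError excluded by Pre_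

-- ===== PRECONDITION & SPEC =====
-- Pre_ excludes exactly the dicts without a 'states' key, on which A raises KeyError.
def Pre_gen_states_for_tx_cell (tx_cell : List (String × List String)) : Prop :=
  ((PySem.Dict.ofList tx_cell).contains "states") = true
instance (tx_cell : List (String × List String)) : Decidable (Pre_gen_states_for_tx_cell tx_cell) := by unfold Pre_gen_states_for_tx_cell; infer_instance

def pvWitness_gen_states_for_tx_cell : (List (String × List String)) := [("states", ["a", "b"])]

def Spec_gen_states_for_tx_cell (tx_cell : List (String × List String)) (out : List (List (String × Int))) : Prop := out = gen_states_for_tx_cell_alt tx_cell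
instance (tx_cell : List (String × List String)) (out : List (List (String × Int))) : Decidable (Spec_gen_states_for_tx_cell tx_cell out) := by unfold Spec_gen_states_for_tx_cell; infer_instance

-- ===== CLAIM (what is proved, stated in full; the proofs are below) =====
def Claim_equal_gen_states_for_tx_cell : Prop := ∀ (tx_cell : List (String × List String)), Dom_gen_states_for_tx_cell tx_cell → Pre_gen_states_for_tx_cell tx_cell → Spec_gen_states_for_tx_cell tx_cell (gen_states_for_tx_cell tx_cell)

-- ===== LEMMAS AND PROOFS =====

-- big-endian bits of i, padded/truncated to width n (last bit = i % 2)
def pvBits : Nat → Nat → List Int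
  | 0, _ => []
  | (n+1), i => pvBits n (i / 2) ++ [((i % 2 : Nat) : Int)]

theorem pvBits_length (n i : Nat) : (pvBits n i).length = n := by
  induction n generalizing i with
  | zero => rfl
  | succ n ih => simp [pvBits, ih]

theorem pvBits_zero (n : Nat) : pvBits n 0 = List.replicate n 0 := by
  induction n with
  | zero => rfl
  | succ n ih => simp [pvBits, ih, List.replicate_succ']

theorem pvBin_zero : pvBin 0 = ['0'] := by simp [pvBin]
theorem pvBin_one : pvBin 1 = ['1'] := by simp [pvBin]

-- the padded-string decode in A equals pvBits, for i < 2^n, n ≥ 1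
theorem pvPad_eq_bits : ∀ n, 1 ≤ n → ∀ i, i < 2^n →
    (List.replicate (n - (pvBin i).length) '0' ++ pvBin i).map (fun c => (c.toNat : Int) - 48)
      = pvBits n i := by
  intro n hn
  induction n, hn using Nat.le_induction with
  | base =>
    intro i hi
    interval_cases i
    · rw [pvBin_zero]; simp [pvBits]
    · rw [pvBin_one]; simp [pvBits]
  | succ n hn ih =>
    intro i hi
    match i with
    | 0 =>
      rw [pvBin_zero]
      simp [pvBits, pvBits_zero, List.map_replicate]
    | 1 =>
      rw [pvBin_one]
      have h1 : pvBits (n+1) 1 = List.replicate n 0 ++ [1] := by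
        simp [pvBits, pvBits_zero]
      simp [h1, List.map_replicate]
    | (m+2) =>
      have h2 : (2:Nat)^(n+1) = 2 * 2^n := by rw [pow_succ]; ring
      have hq : (m+2)/2 < 2^n := by omega
      rw [show pvBin (m+2) = pvBin ((m+2)/2) ++ [if (m+2) % 2 = 1 then '1' else '0'] from by
        rw [pvBin]]
      have hsub : (n + 1) - ((pvBin ((m+2)/2)).length + 1) = n - (pvBin ((m+2)/2)).length := by
        omega
      rw [List.length_append, List.length_cons, List.length_nil, zero_add, hsub,
        ← List.append_assoc, List.map_append, ih ((m+2)/2) hq]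
      have hbit : ((if (m+2) % 2 = 1 then '1' else '0').toNat : Int) - 48 = (((m+2) % 2 : Nat) : Int) := by
        rcases Nat.mod_two_eq_zero_or_one (m+2) with h | h <;> simp [h]
      rw [show pvBits (n+1) (m+2) = pvBits n ((m+2)/2) ++ [(((m+2) % 2 : Nat) : Int)] from rfl]
      simp only [List.map_cons, List.map_nil]
      rw [hbit]

-- the row built for index i: A's comprehension with the decode replaced by pvBits
def pvDesc (names : List String) (n i : Nat) : List (String × Int) :=
  (List.range n).map (fun j => (names.getD j "", (pvBits n i).getD j 0))

theorem pvLoopA_eq_map (names : List String) :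
    pvLoopA names = (List.range (2 ^ names.length)).map (pvDesc names names.length) := by
  simp only [pvLoopA]
  have hsh : (1 <<< names.length) = 2 ^ names.length := by simp [Nat.shiftLeft_eq]
  rw [hsh, PySem.List.pyRange_one]
  rw [show (((2 ^ names.length : Nat) : Int) - 0).toNat = 2 ^ names.length from by rw [Int.sub_zero, Int.toNat_natCast]]
  rw [List.foldl_map, PySem.List.foldl_append_singleton_eq_map]
  apply List.map_congr_left
  intro k hk
  simp only [List.mem_range] at hk
  simp only [zero_add, Int.toNat_natCast]
  unfold pvDesc
  rcases Nat.eq_zero_or_pos names.length with h0 | hpos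
  · simp [h0]
  · rw [pvPad_eq_bits names.length hpos k hk]

-- the binary decode at width n+1 splits off the last bit
theorem pvDesc_step (names : List String) (x : String) (q r : Nat) (hr : r < 2) :
    pvDesc (names ++ [x]) (names.length + 1) (2 * q + r)
      = pvDesc names names.length q ++ [(x, (r : Int))] := by
  unfold pvDesc
  have hdiv : (2 * q + r) / 2 = q := by omega
  have hmod : (2 * q + r) % 2 = r := by omega
  rw [List.range_succ, List.map_append]
  congr 1
  · apply List.map_congr_left
    intro j hj
    simp only [List.mem_range] at hj
    rw [List.getD_append _ _ _ _ (by omega)]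
    simp only [pvBits, hdiv, hmod]
    rw [List.getD_append _ _ _ _ (by rw [pvBits_length]; omega)]
  · have h1 : (names ++ [x]).getD names.length "" = x := by
      rw [List.getD_append_right _ _ _ _ (le_refl _)]
      simp
    have h2 : (pvBits (names.length + 1) (2 * q + r)).getD names.length 0 = (r : Int) := by
      simp only [pvBits, hdiv, hmod]
      rw [List.getD_append_right (pvBits names.length q) [(r : Int)] 0 names.length
        ((pvBits_length names.length q).le)]
      simp [pvBits_length]
    simp only [List.getD] at h1 h2
    simp [h2]

theorem pvRange_double (m : Nat) :
    List.range (2 * m) = (List.range m).flatMap (fun q => [2 * q, 2 * q + 1]) := by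
  induction m with
  | zero => rfl
  | succ m ih =>
    rw [show 2 * (m + 1) = (2 * m + 1) + 1 from by omega,
      List.range_succ, List.range_succ, ih, List.range_succ]
    simp [List.flatMap_append]

theorem pvLoopA_append (names : List String) (x : String) :
    pvLoopA (names ++ [x])
      = (pvLoopA names).flatMap (fun c => [c ++ [(x, (0 : Int))], c ++ [(x, (1 : Int))]]) := by
  rw [pvLoopA_eq_map, pvLoopA_eq_map, List.flatMap_map]
  rw [show (names ++ [x]).length = names.length + 1 from by simp]
  rw [pow_succ, mul_comm (2 ^ names.length) 2, pvRange_double, List.map_flatMap]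
  apply List.flatMap_congr
  intro q _
  have h0 := pvDesc_step names x q 0 (by omega)
  have h1 := pvDesc_step names x q 1 (by omega)
  norm_num at h0 h1
  simp [h0, h1]

theorem pvLoopB_append (names : List String) (x : String) :
    pvLoopB (names ++ [x])
      = (pvLoopB names).flatMap (fun c => [c ++ [(x, (0 : Int))], c ++ [(x, (1 : Int))]]) := by
  unfold pvLoopB
  rw [List.foldl_append]
  rfl

theorem pvLoopA_eq_pvLoopB (names : List String) : pvLoopA names = pvLoopB names := by
  induction names using List.reverseRecOn with
  | nil => rw [pvLoopA_eq_map]; simp [pvDesc, pvLoopB]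
  | append_singleton names x ih =>
    rw [pvLoopA_append, pvLoopB_append, ih]

-- ===== VERDICT (by name: the statement is the Claim_ definition above) =====
theorem gen_states_for_tx_cell_spec : Claim_equal_gen_states_for_tx_cell := by
  intro tx_cell _ _
  unfold Spec_gen_states_for_tx_cell gen_states_for_tx_cell gen_states_for_tx_cell_alt
  rw [pvLoopA_eq_pvLoopB]
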